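-- pv_equiv track=rewrite | github.com/modemobpsycho/my-codewars-solutions | 4kyu/How many numbers III.py | find_ascending
-- ===== SOURCE A (Python) =====
-- def find_ascending(d, start=1):
--     if d == 1:
--         for x in range(start, 10):
--             yield [x]
--     else:
--         for x in range(start, 10):
--             for y in find_ascending(d - 1, x):
--                 yield [x] + y
-- ===== SOURCE B (Python) =====
-- def find_ascending(d, start=1):
--     # Iterative odometer (itertools-style combinations_with_replacement stepping),
--     # no recursion: keep an index vector into the pool, yield, then bump the
--     # rightmost index that is not maxed and reset everything to its right.
--     pool = list(range(start, 10))
--     if not pool: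
--         return
--     idx = [0] * max(d, 0)
--     top = len(pool) - 1
--     while True:
--         yield [pool[i] for i in idx]
--         for j in reversed(range(len(idx))):
--             if idx[j] != top:
--                 break
--         else:
--             return
--         idx[j:] = [idx[j] + 1] * (len(idx) - j)
-- ===== Notes on version B (the rewrite author's own statement) =====
-- stated objective: alternative
-- what changed: Replaced A's recursive generator (one recursion level per remaining digit, rebuilding [x]+y prefixes) by a single non-recursive odometer loop that keeps one index vector into the pool and steps it in place, itertools.combinations_with_replacement-style.
import Mathlib
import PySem

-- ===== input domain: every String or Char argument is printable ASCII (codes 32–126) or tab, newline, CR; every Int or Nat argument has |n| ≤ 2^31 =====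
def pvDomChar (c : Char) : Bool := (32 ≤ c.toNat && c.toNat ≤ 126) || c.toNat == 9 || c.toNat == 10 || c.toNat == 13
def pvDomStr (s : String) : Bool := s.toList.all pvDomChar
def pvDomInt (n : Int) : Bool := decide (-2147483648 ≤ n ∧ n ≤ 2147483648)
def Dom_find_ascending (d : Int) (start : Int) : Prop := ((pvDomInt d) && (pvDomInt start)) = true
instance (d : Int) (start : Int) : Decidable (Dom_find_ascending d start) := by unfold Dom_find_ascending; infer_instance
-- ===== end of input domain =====

-- B replaces A's recursive generator by an iterative, non-recursive odometer over an
-- index vector (itertools-style combinations_with_replacement stepping); same outputs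
-- in the same order on d ≥ 1 (and on the empty-range case 10 ≤ start).

-- ===== PORT A =====
-- A is a generator; its port returns the list of yielded values, in order.
-- Recursion depth is d; `d.toNat` is the structural fuel (for d ≤ 0 the Python A only
-- terminates when range(start,10) is empty, returning [], which fuel 0 also returns;
-- the d ≤ 0, start < 10 inputs — where A hits RecursionError — are outside Pre_).
def find_ascendingAux : Nat → Int → List (List Int)
  | 0, _ => []
  | 1, start => (PySem.List.pyRange start 10 1).map (fun x => [x])
  | (n+2), start => (PySem.List.pyRange start 10 1).flatMap
      (fun x => (find_ascendingAux (n+1) x).map (fun y => [x] ++ y))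

def find_ascending (d : Int) (start : Int) : List (List Int) :=
  find_ascendingAux d.toNat start

-- ===== PORT B =====
-- the `for j in reversed(range(len(idx))): if idx[j] != top: break / else: return` scan:
-- rightmost position whose entry differs from `top` (structural recursion from the left
-- computes the same rightmost index exactly).
def pvRightmost : List Nat → Nat → Option Nat
  | [], _ => none
  | a :: t, top =>
    match pvRightmost t top with
    | some j => some (j + 1)
    | none => if a ≠ top then some 0 else none

-- the `while True` loop; fuel pool.length ^ d.toNat bounds the iteration count (a
-- totality guard only; it is never exhausted).  `pool[i]` is ported as getD: every
-- index kept in idx is < pool.length (loop invariant), so getD is exact there.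
def pvLoopB (pool : List Int) (top : Nat) : Nat → List Nat → List (List Int)
  | 0, _ => []
  | (fuel+1), idx =>
    (idx.map (fun i => pool.getD i 0)) ::
    (match pvRightmost idx top with
     | none => []
     | some j => pvLoopB pool top fuel
         (idx.take j ++ List.replicate (idx.length - j) (idx.getD j 0 + 1)))

def find_ascending_alt (d : Int) (start : Int) : List (List Int) :=
  let pool := PySem.List.pyRange start 10 1
  if pool = [] then []
  else pvLoopB pool (pool.length - 1) (pool.length ^ d.toNat) (List.replicate d.toNat 0)

-- ===== PRECONDITION & SPEC =====
-- Pre_ excludes exactly the inputs where the Python A raises (RecursionError): d ≤ 0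
-- with a non-empty range(start,10).  On d ≤ 0 with start ≥ 10 A returns [] and stays inside Pre_.
def Pre_find_ascending (d : Int) (start : Int) : Prop := 1 ≤ d ∨ 10 ≤ start
instance (d : Int) (start : Int) : Decidable (Pre_find_ascending d start) := by
  unfold Pre_find_ascending; infer_instance

def pvWitness_find_ascending : Int × Int := (2, 7)

def Spec_find_ascending (d : Int) (start : Int) (out : List (List Int)) : Prop :=
  out = find_ascending_alt d start
instance (d : Int) (start : Int) (out : List (List Int)) : Decidable (Spec_find_ascending d start out) := by
  unfold Spec_find_ascending; infer_instance

-- ===== CLAIM (what is proved, stated in full; the proofs are below) =====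
def Claim_equal_find_ascending : Prop := ∀ (d : Int) (start : Int), Dom_find_ascending d start →
  Pre_find_ascending d start → Spec_find_ascending d start (find_ascending d start)

-- ===== LEMMAS AND PROOFS =====

-- all weakly increasing index sequences of length n over [v, plen), in lexicographic order
def pvCombsI (plen : Nat) : Nat → Nat → List (List Nat)
  | 0, _ => [[]]
  | (n+1), v =>
    if _h : v < plen then
      ((pvCombsI plen n v).map (v :: ·)) ++ pvCombsI plen (n+1) (v+1)
    else []
termination_by n v => n + (plen - v)
decreasing_by all_goals omega

-- the same, over digit values [s, 10)
def pvCombsV : Nat → Int → List (List Int)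
  | 0, _ => [[]]
  | (n+1), s =>
    if _h : s < 10 then
      ((pvCombsV n s).map (s :: ·)) ++ pvCombsV (n+1) (s+1)
    else []
termination_by n s => n + (10 - s).toNat
decreasing_by all_goals omega

theorem pv_aux_eq_combsV (M : Nat) : ∀ (n : Nat) (s : Int), n + (10 - s).toNat ≤ M →
    find_ascendingAux (n+1) s = pvCombsV (n+1) s := by
  induction M with
  | zero =>
    intro n s h
    have hn : n = 0 := by omega
    subst hn
    simp only [find_ascendingAux]
    rw [pvCombsV, PySem.List.pyRange_one_eq_nil (by omega), dif_neg (by omega)]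
    simp
  | succ M ih =>
    intro n s h
    by_cases hs : s < 10
    · have hcons := PySem.List.pyRange_one_cons (a := s) (b := 10) hs
      cases n with
      | zero =>
        have e1 : pvCombsV 0 s = [[]] := by rw [pvCombsV]
        have h2 : find_ascendingAux 1 (s+1) = pvCombsV 1 (s+1) := ih 0 (s+1) (by omega)
        simp only [find_ascendingAux] at h2 ⊢
        rw [hcons, pvCombsV, dif_pos hs, e1]
        simp [h2]
      | succ n =>
        have hA : find_ascendingAux (n+1) s = pvCombsV (n+1) s := ih n s (by omega)
        have hB : find_ascendingAux (n+2) (s+1) = pvCombsV (n+2) (s+1) := ih (n+1) (s+1) (by omega)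
        simp only [find_ascendingAux] at hB ⊢
        simp only [List.singleton_append] at hB
        rw [hcons, pvCombsV, dif_pos hs]
        simp [List.flatMap_cons, hA, hB]
    · cases n with
      | zero =>
        simp only [find_ascendingAux]
        rw [pvCombsV, dif_neg (by omega), PySem.List.pyRange_one_eq_nil (by omega)]
        simp
      | succ n =>
        simp only [find_ascendingAux]
        rw [pvCombsV, dif_neg (by omega), PySem.List.pyRange_one_eq_nil (by omega)]
        simp

theorem pv_rightmost_append (u : List Nat) (a top : Nat) :
    pvRightmost (u ++ [a]) top =
      if a = top then pvRightmost u top else some u.length := by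
  induction u with
  | nil =>
    by_cases h : a = top <;> simp [pvRightmost, h]
  | cons b t ih =>
    simp only [List.cons_append, pvRightmost, ih, List.length_cons]
    by_cases h : a = top
    · simp [h]
    · simp [h]

theorem pv_rightmost_lt (u : List Nat) (top j : Nat) (h : pvRightmost u top = some j) :
    j < u.length := by
  induction u generalizing j with
  | nil => simp [pvRightmost] at h
  | cons b t ih =>
    simp only [pvRightmost] at h
    cases hr : pvRightmost t top with
    | some k => rw [hr] at h; have := ih k hr; simp at h ⊢; omega

    | none =>
      rw [hr] at h
      by_cases hb : b = top
      · simp [hb] at h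
      · simp [hb] at h; simp [← h]

theorem pv_combsI_len (plen : Nat) (M : Nat) : ∀ (n v : Nat), n + (plen - v) ≤ M →
    (pvCombsI plen n v).length ≤ (plen - v)^n := by
  induction M with
  | zero =>
    intro n v h
    have hn : n = 0 := by omega
    subst hn
    rw [pvCombsI]
    simp
  | succ M ih =>
    intro n v h
    cases n with
    | zero => rw [pvCombsI]; simp
    | succ n =>
      rw [pvCombsI]
      by_cases hv : v < plen
      · rw [dif_pos hv]
        have h1 := ih n v (by omega)
        have h2 := ih (n+1) (v+1) (by omega)
        have hp : (plen-(v+1))^n ≤ (plen-v)^n := Nat.pow_le_pow_left (by omega) n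
        have key : (plen-v)^n + (plen-(v+1))^(n+1) ≤ (plen-v)^(n+1) := by
          calc (plen-v)^n + (plen-(v+1))^(n+1)
              = (plen-v)^n + (plen-(v+1))^n * (plen-(v+1)) := by rw [pow_succ]
            _ ≤ (plen-v)^n + (plen-v)^n * (plen-(v+1)) :=
                Nat.add_le_add_left (Nat.mul_le_mul_right _ hp) _
            _ = (plen-v)^n * (1 + (plen-(v+1))) := by ring
            _ = (plen-v)^n * (plen-v) := by congr 1; omega
            _ = (plen-v)^(n+1) := (pow_succ _ _).symm
        simp only [List.length_append, List.length_map]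
        exact le_trans (Nat.add_le_add h1 h2) key
      · rw [dif_neg hv]; simp

theorem pv_loop_run (pool : List Int) (plen : Nat) (M : Nat) :
    ∀ (n v : Nat) (u : List Nat) (fuel : Nat), n + (plen - v) ≤ M → v < plen →
      pvLoopB pool (plen-1) ((pvCombsI plen n v).length + fuel) (u ++ List.replicate n v)
      = ((pvCombsI plen n v).map (fun t => (u ++ t).map (fun i => pool.getD i 0))) ++
        (match pvRightmost u (plen-1) with
         | none => []
         | some j => pvLoopB pool (plen-1) fuel
             (u.take j ++ List.replicate (u.length + n - j) (u.getD j 0 + 1))) := by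
  induction M with
  | zero => intro n v u fuel h hv; omega
  | succ M ih =>
    intro n v u fuel h hv
    cases n with
    | zero =>
      have e0 : pvCombsI plen 0 v = [[]] := by rw [pvCombsI]
      rw [e0]
      simp only [List.length_cons, List.length_nil, List.replicate_zero, List.append_nil,
        Nat.zero_add, Nat.add_zero]
      rw [Nat.add_comm 1 fuel, pvLoopB]
      cases hru : pvRightmost u (plen-1) with
      | none => simp
      | some j => simp
    | succ n =>
      rw [pvCombsI, dif_pos hv]
      rw [List.replicate_succ, List.append_cons]
      simp only [List.length_append, List.length_map]
      rw [Nat.add_assoc]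
      rw [ih n v (u ++ [v]) ((pvCombsI plen (n+1) (v+1)).length + fuel) (by omega) hv]
      rw [pv_rightmost_append]
      by_cases hv1 : v + 1 < plen
      · have hvt : ¬ (v = plen - 1) := by omega
        rw [if_neg hvt]
        simp only []
        have hget : (u ++ [v]).getD u.length 0 = v := by
          rw [List.getD_append_right _ _ _ _ (le_refl _)]
          simp
        have hcnt : (u ++ [v]).length + n - u.length = n + 1 := by
          simp only [List.length_append, List.length_cons, List.length_nil]
          omega
        have hst : (u ++ [v]).take u.length ++
            List.replicate ((u ++ [v]).length + n - u.length) ((u ++ [v]).getD u.length 0 + 1)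
            = u ++ List.replicate (n+1) (v+1) := by
          rw [hget, hcnt, List.take_append_of_le_length (le_refl _), List.take_length]
        rw [hst]
        rw [ih (n+1) (v+1) u fuel (by omega) hv1]
        simp only [List.map_append, List.map_map, Function.comp_def, List.append_assoc, List.map_cons, List.cons_append, List.nil_append]
      · have hvt : v = plen - 1 := by omega
        rw [if_pos hvt]
        have e2 : pvCombsI plen (n+1) (v+1) = [] := by
          rw [pvCombsI, dif_neg (by omega)]
        rw [e2]
        simp only [List.length_nil, Nat.zero_add, List.append_nil]
        cases hru : pvRightmost u (plen-1) with
        | none =>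
          simp only []
          simp only [List.map_append, List.map_map, Function.comp_def, List.append_assoc, List.map_cons, List.cons_append, List.nil_append]
        | some j =>
          simp only []
          have hj := pv_rightmost_lt u _ j hru
          have hst : (u ++ [v]).take j ++
              List.replicate ((u ++ [v]).length + n - j) ((u ++ [v]).getD j 0 + 1)
              = u.take j ++ List.replicate (u.length + (n+1) - j) (u.getD j 0 + 1) := by
            rw [List.take_append_of_le_length (le_of_lt hj), List.getD_append _ _ _ _ hj]
            congr 2
            simp only [List.length_append, List.length_cons, List.length_nil]
            omega
          rw [hst]
          simp only [List.map_append, List.map_map, Function.comp_def, List.append_assoc, List.map_cons, List.cons_append, List.nil_append]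

theorem pv_combsI_render (start : Int) (M : Nat) :
    ∀ (n v : Nat), n + ((PySem.List.pyRange start 10 1).length - v) ≤ M →
      (pvCombsI (PySem.List.pyRange start 10 1).length n v).map
        (List.map (fun i => (PySem.List.pyRange start 10 1).getD i 0))
      = pvCombsV n (start + v) := by
  induction M with
  | zero =>
    intro n v h
    have hn : n = 0 := by omega
    subst hn
    rw [pvCombsI, pvCombsV]
    simp
  | succ M ih =>
    intro n v h
    cases n with
    | zero =>
      rw [pvCombsI, pvCombsV]
      simp
    | succ n =>
      by_cases hv : v < (PySem.List.pyRange start 10 1).length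
      · have h10 : start + (v : Int) < 10 := by
          rw [PySem.List.length_pyRange_one] at hv
          omega
        have hget : (PySem.List.pyRange start 10 1).getD v 0 = start + v := by
          rw [List.getD_eq_getElem _ _ hv, PySem.List.getElem_pyRange_one]
        rw [pvCombsI, dif_pos hv, pvCombsV, dif_pos h10]
        rw [List.map_append, List.map_map]
        have h1 := ih n v (by omega)
        have h2 := ih (n+1) (v+1) (by omega)
        rw [h2]
        have ecast : start + (v : Int) + 1 = start + ((v + 1 : Nat) : Int) := by push_cast; ring
        rw [ecast]
        congr 1
        rw [← h1]
        simp only [List.map_map, Function.comp_def, List.map_cons]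
        refine List.map_congr_left ?_
        intro t _
        simp [show ((v : Int) < 10 - start) from by omega]
      · have h10 : ¬ (start + (v : Int) < 10) := by
          rw [PySem.List.length_pyRange_one] at hv
          omega
        rw [pvCombsI, dif_neg hv, pvCombsV, dif_neg h10]
        simp

-- ===== VERDICT (by name: the statement is the Claim_ definition above) =====
theorem find_ascending_spec : Claim_equal_find_ascending := by
  intro d start _ hpre
  unfold Spec_find_ascending find_ascending find_ascending_alt
  by_cases hs : (10 : Int) ≤ start
  · have hp : PySem.List.pyRange start 10 1 = [] := PySem.List.pyRange_one_eq_nil hs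
    simp only [hp]
    cases hd : d.toNat with
    | zero => rw [find_ascendingAux]; simp
    | succ m =>
      cases m with
      | zero => rw [find_ascendingAux, hp]; simp
      | succ k => rw [find_ascendingAux, hp]; simp
  · have hs' : start < 10 := by omega
    have h1d : 1 ≤ d := by
      rcases hpre with h | h
      · exact h
      · omega
    obtain ⟨m, hm⟩ : ∃ m, d.toNat = m + 1 := ⟨d.toNat - 1, by omega⟩
    have hp : PySem.List.pyRange start 10 1 ≠ [] := by
      rw [PySem.List.pyRange_one_cons hs']
      simp
    simp only [hm, if_neg hp]
    have hplen : 0 < (PySem.List.pyRange start 10 1).length := by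
      rw [PySem.List.length_pyRange_one]
      omega
    have hA := pv_aux_eq_combsV (m + (10 - start).toNat) m start (le_refl _)
    rw [hA]
    have hlen := pv_combsI_len (PySem.List.pyRange start 10 1).length
      ((m+1) + (PySem.List.pyRange start 10 1).length) (m+1) 0 (by omega)
    simp only [Nat.sub_zero] at hlen
    have hfuel : (PySem.List.pyRange start 10 1).length ^ (m+1)
        = (pvCombsI (PySem.List.pyRange start 10 1).length (m+1) 0).length
          + ((PySem.List.pyRange start 10 1).length ^ (m+1)
             - (pvCombsI (PySem.List.pyRange start 10 1).length (m+1) 0).length) := by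
      omega
    rw [hfuel]
    have hrun := pv_loop_run (PySem.List.pyRange start 10 1)
      (PySem.List.pyRange start 10 1).length
      ((m+1) + (PySem.List.pyRange start 10 1).length) (m+1) 0 []
      ((PySem.List.pyRange start 10 1).length ^ (m+1)
        - (pvCombsI (PySem.List.pyRange start 10 1).length (m+1) 0).length)
      (by omega) hplen
    simp only [List.nil_append, pvRightmost] at hrun
    rw [hrun]
    have hr := pv_combsI_render start ((m+1) + (PySem.List.pyRange start 10 1).length)
      (m+1) 0 (by omega)
    simp only [Nat.cast_zero, add_zero] at hr
    rw [hr]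
    simp
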